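-- pv_equiv track=rewrite | github.com/pjot/advent-of-code | 2017/11/11.py | step
-- ===== SOURCE A (Python) =====
-- def step(steps):
--     hex_grid = {}
--     '''
--     x = ne-sw
--     y = nw-se
--     '''
--     curr = (0, 0)
--     seen = set()
--     for step in steps.split(','):
--         dx, dy = 0, 0
--         if step == 'n':
--             dx = 1
--             dy = 1
--         if step == 's':
--             dx = -1
--             dy = -1
--         if step == 'se':
--             dy = -1
--         if step == 'nw':
--             dy = 1
--         if step == 'ne':
--             dx = 1
--         if step == 'sw':
--             dx = -1
--
--         x, y = curr
--         curr = (x + dx, y + dy)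
--         seen.add(curr)
--
--     return curr, seen
-- ===== SOURCE B (Python) =====
-- _DELTAS = {'n': (1, 1), 's': (-1, -1), 'se': (0, -1),
--            'nw': (0, 1), 'ne': (1, 0), 'sw': (-1, 0)}
--
-- def _walk(toks):
--     # divide and conquer: returns (net displacement, full position trace) of the
--     # segment, both relative to the segment's start point
--     if len(toks) == 1:
--         d = _DELTAS.get(toks[0], (0, 0))
--         return d, [d]
--     mid = len(toks) // 2
--     (lx, ly), ltrace = _walk(toks[:mid])
--     (rx, ry), rtrace = _walk(toks[mid:])
--     return (lx + rx, ly + ry), ltrace + [(lx + px, ly + py) for (px, py) in rtrace]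
--
-- def step(steps):
--     curr, trace = _walk(steps.split(','))
--     return curr, set(trace)
-- ===== Notes on version B (the rewrite author's own statement) =====
-- stated objective: alternative
-- what changed: Replaces A's single incremental pass (per-token if-chain updating a running point and a mutable seen set) with a divide-and-conquer walk: each half of the token list is solved independently relative to its own start, the right half's trace is translated by the left half's net displacement, and the visited set is built once from the assembled trace.
import Mathlib
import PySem

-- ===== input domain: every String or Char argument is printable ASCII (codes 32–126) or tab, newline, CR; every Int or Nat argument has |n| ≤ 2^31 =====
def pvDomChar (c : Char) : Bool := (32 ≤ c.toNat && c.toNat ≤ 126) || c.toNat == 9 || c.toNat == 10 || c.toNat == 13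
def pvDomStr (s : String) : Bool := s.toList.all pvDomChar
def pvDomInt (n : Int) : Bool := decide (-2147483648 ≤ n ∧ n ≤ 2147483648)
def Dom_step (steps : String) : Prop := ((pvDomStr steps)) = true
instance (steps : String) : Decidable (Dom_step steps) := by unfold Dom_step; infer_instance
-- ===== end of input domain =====

-- B replaces A's single incremental pass (if-chain, running point, mutable seen set) with a
-- divide-and-conquer walk: each half is solved relative to its own start, the right half's
-- trace is translated by the left half's displacement, and the set is built once at the end.

-- ===== PORT A =====
-- the if-chain of A, computing (dx, dy) for one token
def stepDelta (t : String) : Int × Int :=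
  let dx : Int := 0
  let dy : Int := 0
  let (dx, dy) := if t == "n" then ((1 : Int), (1 : Int)) else (dx, dy)
  let (dx, dy) := if t == "s" then ((-1 : Int), (-1 : Int)) else (dx, dy)
  let dy := if t == "se" then (-1 : Int) else dy
  let dy := if t == "nw" then (1 : Int) else dy
  let dx := if t == "ne" then (1 : Int) else dx
  let dx := if t == "sw" then (-1 : Int) else dx
  (dx, dy)

def step (steps : String) : (Int × Int) × (List (Int × Int)) :=
  ((PySem.Str.split? steps ",").getD []).foldl  -- split? is some: sep "," ≠ ""
    (fun (st : (Int × Int) × PySem.Set (Int × Int)) t =>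
      let d := stepDelta t
      let curr := (st.1.1 + d.1, st.1.2 + d.2)
      (curr, PySem.Set.add st.2 curr))
    ((0, 0), PySem.Set.empty)

-- ===== PORT B =====
def deltaTable : PySem.Dict String (Int × Int) :=
  PySem.Dict.mk [("n", (1, 1)), ("s", (-1, -1)), ("se", (0, -1)), ("nw", (0, 1)), ("ne", (1, 0)), ("sw", (-1, 0))]

-- _DELTAS.get(t, (0, 0))
def walkDelta (t : String) : Int × Int := PySem.Dict.getD deltaTable t (0, 0)

-- Source B's _walk: divide and conquer on the token list; the [] arm is unreachable in B
-- (split always yields at least one token) and only makes the recursion total.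
def walk (toks : List String) : (Int × Int) × (List (Int × Int)) :=
  match toks with
  | [] => ((0, 0), [])
  | [t] =>
    let d := walkDelta t
    (d, [d])
  | t1 :: t2 :: rest =>
    let mid := (t1 :: t2 :: rest).length / 2
    let l := walk ((t1 :: t2 :: rest).take mid)
    let r := walk ((t1 :: t2 :: rest).drop mid)
    ((l.1.1 + r.1.1, l.1.2 + r.1.2), l.2 ++ r.2.map (fun p => (l.1.1 + p.1, l.1.2 + p.2)))
termination_by toks.length
decreasing_by
  · simp [List.length_take]; omega
  · simp [List.length_drop]; omega

def step_alt (steps : String) : (Int × Int) × (List (Int × Int)) :=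
  let res := walk ((PySem.Str.split? steps ",").getD [])
  (res.1, PySem.Set.ofList res.2)

-- ===== PRECONDITION & SPEC =====
def Spec_step (steps : String) (out : (Int × Int) × (List (Int × Int))) : Prop := out = step_alt steps
instance (steps : String) (out : (Int × Int) × (List (Int × Int))) : Decidable (Spec_step steps out) := by unfold Spec_step; infer_instance

-- ===== CLAIM (what is proved, stated in full; the proofs are below) =====
def Claim_equal_step : Prop := ∀ (steps : String), Dom_step steps → Spec_step steps (step steps)

-- ===== LEMMAS AND PROOFS =====
-- A's if-chain and B's table agree on every token
theorem delta_eq (t : String) : stepDelta t = walkDelta t := by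
  by_cases h1 : t = "n"; · subst h1; decide
  by_cases h2 : t = "s"; · subst h2; decide
  by_cases h3 : t = "se"; · subst h3; decide
  by_cases h4 : t = "nw"; · subst h4; decide
  by_cases h5 : t = "ne"; · subst h5; decide
  by_cases h6 : t = "sw"; · subst h6; decide
  have b1 : (("n" : String) == t) = false := by simpa using Ne.symm h1
  have b2 : (("s" : String) == t) = false := by simpa using Ne.symm h2
  have b3 : (("se" : String) == t) = false := by simpa using Ne.symm h3
  have b4 : (("nw" : String) == t) = false := by simpa using Ne.symm h4
  have b5 : (("ne" : String) == t) = false := by simpa using Ne.symm h5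
  have b6 : (("sw" : String) == t) = false := by simpa using Ne.symm h6
  simp [stepDelta, walkDelta, deltaTable, PySem.Dict.getD,
        h1, h2, h3, h4, h5, h6, b1, b2, b3, b4, b5, b6, PySem.Dict.get?]

-- the prefix-position trace of a delta list from (x, y), and the total displacement
def scanPos : Int → Int → List (Int × Int) → List (Int × Int)
  | _, _, [] => []
  | x, y, d :: ds =>
    let x' := x + d.1
    let y' := y + d.2
    (x', y') :: scanPos x' y' ds

def sumD (ds : List (Int × Int)) : Int × Int :=
  ds.foldr (fun d s => (d.1 + s.1, d.2 + s.2)) (0, 0)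

theorem sumD_cons (d : Int × Int) (ds : List (Int × Int)) :
    sumD (d :: ds) = (d.1 + (sumD ds).1, d.2 + (sumD ds).2) := rfl

theorem sumD_append (l r : List (Int × Int)) :
    sumD (l ++ r) = ((sumD l).1 + (sumD r).1, (sumD l).2 + (sumD r).2) := by
  induction l with
  | nil => simp [sumD]
  | cons d l ih => simp [sumD_cons, ih, add_assoc]

theorem scan_shift (x y : Int) (ds : List (Int × Int)) :
    scanPos x y ds = (scanPos 0 0 ds).map (fun p => (x + p.1, y + p.2)) := by
  induction ds generalizing x y with
  | nil => simp [scanPos]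
  | cons d ds ih =>
    simp only [scanPos, List.map_cons, zero_add]
    congr 1
    rw [ih (x + d.1) (y + d.2), ih d.1 d.2, List.map_map]
    simp [Function.comp, add_assoc]

theorem scan_append (x y : Int) (l r : List (Int × Int)) :
    scanPos x y (l ++ r) = scanPos x y l ++ scanPos (x + (sumD l).1) (y + (sumD l).2) r := by
  induction l generalizing x y with
  | nil => simp [scanPos, sumD]
  | cons d l ih =>
    simp only [List.cons_append, scanPos, ih, sumD_cons]
    simp [add_assoc]

theorem lastD_cons (p : Int × Int) (l : List (Int × Int)) (d : Int × Int) :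
    PySem.List.pyGetD (p :: l) (-1) d = PySem.List.pyGetD l (-1) p := by
  cases l <;> simp [PySem.List.pyGetD, PySem.List.pyGet?_neg_one, List.getLast?_cons]

theorem scan_last (x y : Int) (ds : List (Int × Int)) :
    PySem.List.pyGetD (scanPos x y ds) (-1) (x, y) = (x + (sumD ds).1, y + (sumD ds).2) := by
  induction ds generalizing x y with
  | nil => simp [scanPos, sumD, PySem.List.pyGetD, PySem.List.pyGet?_neg_one]
  | cons d ds ih =>
    simp only [scanPos, lastD_cons, sumD_cons]
    rw [ih]
    simp [add_assoc]

-- A's single pass computes the last trace point and the set of trace points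
theorem loop_eq (toks : List String) (x y : Int) (s : PySem.Set (Int × Int)) :
    toks.foldl
      (fun (st : (Int × Int) × PySem.Set (Int × Int)) t =>
        let d := stepDelta t
        let curr := (st.1.1 + d.1, st.1.2 + d.2)
        (curr, PySem.Set.add st.2 curr))
      ((x, y), s)
    = (PySem.List.pyGetD (scanPos x y (toks.map walkDelta)) (-1) (x, y),
       PySem.Set.update s (scanPos x y (toks.map walkDelta))) := by
  induction toks generalizing x y s with
  | nil => simp [scanPos, PySem.List.pyGetD, PySem.List.pyGet?_neg_one, PySem.Set.update]
  | cons t ts ih =>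
    simp only [List.foldl_cons, List.map_cons, scanPos, ← delta_eq]
    rw [ih, lastD_cons, PySem.Set.update_cons]

-- B's divide and conquer computes the total displacement and the same trace
theorem walk_eq (toks : List String) :
    walk toks = (sumD (toks.map walkDelta), scanPos 0 0 (toks.map walkDelta)) := by
  induction toks using walk.induct with
  | case1 => simp [walk, sumD, scanPos]
  | case2 t =>
    simp only [walk, List.map_cons, List.map_nil, sumD, scanPos]
    simp
  | case3 t1 t2 rest mid ihl ihr =>
    simp only [walk]
    rw [show mid = (t1 :: t2 :: rest).length / 2 from rfl] at ihl ihr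
    simp only [ihl, ihr]
    have hsplit : (t1 :: t2 :: rest).take ((t1 :: t2 :: rest).length / 2)
        ++ (t1 :: t2 :: rest).drop ((t1 :: t2 :: rest).length / 2) = t1 :: t2 :: rest :=
      List.take_append_drop _ _
    conv_rhs => rw [← hsplit]
    rw [List.map_append, sumD_append, scan_append, scan_shift (0 + _) (0 + _)]
    simp [List.map_take, List.map_drop]

-- ===== VERDICT (by name: the statement is the Claim_ definition above) =====
theorem step_spec : Claim_equal_step := by
  intro steps _
  unfold Spec_step step step_alt
  rw [loop_eq, walk_eq]
  simp [scan_last, PySem.Set.empty, PySem.Set.update_nil_left]
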